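-- pv_equiv track=rewrite | github.com/YanliLi27/IFA | predefined/esmira_components/generators/init_utils/dataset_scanner.py | _common_list_generator
-- ===== SOURCE A (Python) =====
-- def _common_list_generator(init_dict:dict) ->dict:
--     common_list = {}
--     # init_dict{'EAC_Wrist_TRA':idlist, ...}
--     keys = init_dict.keys()  # 'EAC_Wrist_TRA', 'EAC_Wrist_COR'
--
--     # find groups: not limited in EAC/CSA/ATL
--     groups = []
--     for key in keys:
--         key_name = key.split('_')
--         key_group = key_name[0]
--         if key_group not in groups:
--             groups.append(key_group)
--     # groups = ['EAC', 'CSA', 'ATL']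
--     assert len(groups)==3  # TODO for now, only 3
--     for group in groups:
--         group_id_list = []
--         # 'EAC' as example,
--         for key in keys:
--             if group in key:
--                 group_id_list.append(init_dict[key])  # list of ids
--         # group_id_list [[], [], [], [], ...] 6* [ids_length]
--         group_common = set(group_id_list[0]).intersection(*group_id_list[1:])
--         common_list[group] = group_common
--     return common_list  # {'EAC':[LIST], 'CSA':[LIST], 'ATL':[LIST]}
-- ===== SOURCE B (Python) =====
-- def _common_list_generator(init_dict: dict) -> dict:
--     # One sweep over the items, keeping a running intersection per group, instead of
--     # A's per-group rescan of all keys and materialised list-of-lists.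
--     groups = list(dict.fromkeys(k.split('_')[0] for k in init_dict))
--     assert len(groups) == 3
--     acc = {}
--     for key, ids in init_dict.items():
--         for g in groups:
--             if g in key:
--                 acc[g] = set(ids) if g not in acc else acc[g].intersection(ids)
--     return {g: acc.get(g, set()) for g in groups}
-- ===== Notes on version B (the rewrite author's own statement) =====
-- stated objective: alternative
-- what changed: Single sweep over the dict items maintaining a running per-group intersection in a dict (no per-group rescan of all keys and no materialised list-of-id-lists), with groups obtained by an ordered dedup of the '_'-prefixes.
import Mathlib
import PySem

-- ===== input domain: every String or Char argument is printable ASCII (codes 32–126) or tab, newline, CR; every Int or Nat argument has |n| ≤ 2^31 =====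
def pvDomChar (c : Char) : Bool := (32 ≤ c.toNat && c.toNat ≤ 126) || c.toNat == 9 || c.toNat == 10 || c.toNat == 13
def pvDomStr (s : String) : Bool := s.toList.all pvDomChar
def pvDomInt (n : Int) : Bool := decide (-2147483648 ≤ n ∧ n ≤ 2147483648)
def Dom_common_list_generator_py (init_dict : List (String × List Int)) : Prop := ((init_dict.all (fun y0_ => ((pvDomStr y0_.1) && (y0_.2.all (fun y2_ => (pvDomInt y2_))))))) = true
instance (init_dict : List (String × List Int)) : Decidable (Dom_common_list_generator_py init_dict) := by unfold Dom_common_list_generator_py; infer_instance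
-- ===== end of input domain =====

-- B replaces A's per-group rescans of all keys by one sweep over the items keeping a
-- running intersection per group (objective: alternative decomposition, same cost).

-- shared input decoding: the assoc list is the encoding of a Python dict
def pvDecode (init_dict : List (String × List Int)) : PySem.Dict String (List Int) :=
  init_dict.foldl (fun d p => d.insert p.1 p.2) PySem.Dict.empty

-- key.split('_')[0]; split? with a non-empty separator is always `some` of a non-empty list,
-- so getD/headD are total renderings of the `some`-value's element 0
def pvKeyGroup (k : String) : String := ((PySem.Str.split? k "_").getD []).headD ""

-- ===== PORT A =====
-- body of A's per-group loop: collect the id-lists of the keys containing `group`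
-- (gil), then set(gil[0]).intersection(*gil[1:]).  gil[0] is never an IndexError in
-- Python (each group is the '_'-prefix, hence a substring, of one of the keys);
-- headD [] is a total rendering of that element access.
def pvGroupCommon (d : PySem.Dict String (List Int)) (keys : List String) (group : String) : PySem.Set Int :=
  let gil : List (List Int) :=
    keys.foldl (fun acc k => if PySem.Str.isIn group k then acc ++ [d.getD k []] else acc) []
  (gil.drop 1).foldl (fun s l => PySem.Set.inter s l) (PySem.Set.ofList (gil.headD []))

def common_list_generator_py (init_dict : List (String × List Int)) : List (String × List Int) :=
  let d := pvDecode init_dict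
  let keys := d.keys
  let groups : PySem.Set String :=
    keys.foldl (fun gs k => PySem.Set.add gs (pvKeyGroup k)) PySem.Set.empty
  -- `assert len(groups) == 3` raises exactly outside Pre_common_list_generator_py
  groups.foldl (fun cl group => cl ++ [(group, pvGroupCommon d keys group)]) []

-- ===== PORT B =====
-- acc.get(g): set(ids) on first hit, else the running intersection narrowed by ids
def pvCombine (o : Option (List Int)) (ids : List Int) : List Int :=
  match o with
  | none => PySem.Set.ofList ids
  | some s => PySem.Set.inter s ids

-- body of B's inner loop over the groups, for one item (k, ids)
def pvInner (k : String) (ids : List Int) (acc : PySem.Dict String (List Int)) (g : String) :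
    PySem.Dict String (List Int) :=
  if PySem.Str.isIn g k then acc.insert g (pvCombine (acc.get? g) ids) else acc

def common_list_generator_py_alt (init_dict : List (String × List Int)) : List (String × List Int) :=
  let d := pvDecode init_dict
  let groups := PySem.List.dedup (d.keys.map pvKeyGroup)
  -- `assert len(groups) == 3` raises exactly outside Pre_common_list_generator_py
  let acc : PySem.Dict String (List Int) :=
    d.items.foldl (fun acc p => groups.foldl (pvInner p.1 p.2) acc) PySem.Dict.empty
  groups.map (fun g => (g, acc.getD g []))

-- ===== PRECONDITION & SPEC =====
-- Pre_ excludes exactly the dicts whose keys do not have exactly 3 distinct '_'-prefixes: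
-- there Python A (and B) raise AssertionError. (The dict's key sequence is the ordered
-- dedup of the assoc list's key column.)
def Pre_common_list_generator_py (init_dict : List (String × List Int)) : Prop :=
  (PySem.List.dedup ((PySem.List.dedup (init_dict.map (·.1))).map pvKeyGroup)).length = 3
instance (init_dict : List (String × List Int)) : Decidable (Pre_common_list_generator_py init_dict) := by unfold Pre_common_list_generator_py; infer_instance

def pvWitness_common_list_generator_py : (List (String × List Int)) :=
  [("EAC_Wrist_TRA", [1, 2]), ("EAC_Wrist_COR", [2, 3]), ("CSA_Wrist_TRA", [4]), ("ATL_Wrist_TRA", [5])]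

def Spec_common_list_generator_py (init_dict : List (String × List Int)) (out : List (String × List Int)) : Prop := out = common_list_generator_py_alt init_dict
instance (init_dict : List (String × List Int)) (out : List (String × List Int)) : Decidable (Spec_common_list_generator_py init_dict out) := by unfold Spec_common_list_generator_py; infer_instance

-- ===== CLAIM (what is proved, stated in full; the proofs are below) =====
def Claim_equal_common_list_generator_py : Prop := ∀ (init_dict : List (String × List Int)), Dom_common_list_generator_py init_dict → Pre_common_list_generator_py init_dict → Spec_common_list_generator_py init_dict (common_list_generator_py init_dict)

-- ===== LEMMAS AND PROOFS =====

-- B's inner loop leaves the entry of a group it does not visit untouched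
theorem pvInner_skip (k : String) (ids : List Int) (g : String) :
    ∀ (gs : List String) (acc : PySem.Dict String (List Int)), g ∉ gs →
      (gs.foldl (pvInner k ids) acc).get? g = acc.get? g := by
  intro gs
  induction gs with
  | nil => intro acc _; rfl
  | cons g' t ih =>
      intro acc hg
      have hne : g ≠ g' := fun h => hg (h ▸ List.mem_cons_self)
      have hnt : g ∉ t := fun h => hg (List.mem_cons_of_mem _ h)
      simp only [List.foldl_cons]
      rw [ih _ hnt]
      unfold pvInner
      split
      · exact PySem.Dict.get?_insert_of_ne _ _ hne
      · rfl

-- effect of B's inner loop on the entry of a visited group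
theorem pvInner_hit (k : String) (ids : List Int) (g : String) :
    ∀ (gs : List String) (acc : PySem.Dict String (List Int)), gs.Nodup → g ∈ gs →
      (gs.foldl (pvInner k ids) acc).get? g =
        if PySem.Str.isIn g k then some (pvCombine (acc.get? g) ids) else acc.get? g := by
  intro gs
  induction gs with
  | nil => intro acc _ h; cases h
  | cons g' t ih =>
      intro acc hnd hg
      simp only [List.foldl_cons]
      rcases List.mem_cons.mp hg with rfl | hgt
      · have hgt : g ∉ t := (List.nodup_cons.mp hnd).1
        rw [pvInner_skip _ _ _ _ _ hgt]
        unfold pvInner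
        split
        · exact PySem.Dict.get?_insert_self _ _ _
        · rfl
      · have hne : g ≠ g' := fun h => (List.nodup_cons.mp hnd).1 (h ▸ hgt)
        have hpres : (pvInner k ids acc g').get? g = acc.get? g := by
          unfold pvInner
          split
          · exact PySem.Dict.get?_insert_of_ne _ _ hne
          · rfl
        rw [ih _ (List.nodup_cons.mp hnd).2 hgt, hpres]

-- the whole double loop of B, projected to one group's entry, is a one-dimensional fold
theorem pv_outer (G : List String) (g : String) (hnd : G.Nodup) (hg : g ∈ G) :
    ∀ (ps : List (String × List Int)) (acc : PySem.Dict String (List Int)),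
      (ps.foldl (fun acc p => G.foldl (pvInner p.1 p.2) acc) acc).get? g =
        ps.foldl (fun o p => if PySem.Str.isIn g p.1 then some (pvCombine o p.2) else o) (acc.get? g) := by
  intro ps
  induction ps with
  | nil => intro acc; rfl
  | cons p t ih =>
      intro acc
      simp only [List.foldl_cons]
      rw [ih, pvInner_hit p.1 p.2 g G acc hnd hg]

-- the one-dimensional fold from a `some` state is A's intersection fold
theorem pv_state_some (c : String → Bool) :
    ∀ (ps : List (String × List Int)) (s : List Int),
      ps.foldl (fun o p => if c p.1 then some (pvCombine o p.2) else o) (some s) =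
        some (((ps.filter (fun p => c p.1)).map (·.2)).foldl (fun s l => PySem.Set.inter s l) s) := by
  intro ps
  induction ps with
  | nil => intro s; rfl
  | cons p t ih =>
      intro s
      simp only [List.foldl_cons, List.filter_cons]
      by_cases h : c p.1
      · simp only [h, if_pos]
        rw [ih]
        rfl
      · simp only [h, Bool.false_eq_true, if_false]
        exact ih s

-- the one-dimensional fold from `none`: empty filter gives none, else A's fold
theorem pv_state_none (c : String → Bool) :
    ∀ (ps : List (String × List Int)),
      ps.foldl (fun o p => if c p.1 then some (pvCombine o p.2) else o) none =
        (match (ps.filter (fun p => c p.1)).map (·.2) with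
         | [] => none
         | h :: t => some (t.foldl (fun s l => PySem.Set.inter s l) (PySem.Set.ofList h))) := by
  intro ps
  induction ps with
  | nil => rfl
  | cons p t ih =>
      simp only [List.foldl_cons, List.filter_cons]
      by_cases h : c p.1
      · simp only [h, if_pos, List.map_cons]
        rw [pv_state_some]
        rfl
      · simp only [h, Bool.false_eq_true, if_false]
        exact ih


-- per-group value equality: B's dict entry equals A's per-group computation
theorem pv_group_eq (d : PySem.Dict String (List Int)) (hnd : d.keys.Nodup)
    (G : List String) (hG : G.Nodup) (g : String) (hg : g ∈ G) :
    (d.items.foldl (fun acc p => G.foldl (pvInner p.1 p.2) acc) PySem.Dict.empty).getD g []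
      = pvGroupCommon d d.keys g := by
  rw [PySem.Dict.getD_eq_get?_getD, pv_outer G g hG hg, PySem.Dict.get?_empty,
      pv_state_none (fun s => PySem.Str.isIn g s)]
  unfold pvGroupCommon
  rw [PySem.List.foldl_append_if (fun k => PySem.Str.isIn g k) (fun k => d.getD k []) d.keys []]
  rw [PySem.Dict.items_eq_map_keys d hnd [], List.filter_map, List.map_map]
  simp only [Function.comp_def, List.nil_append]
  generalize (List.filter (fun k => PySem.Str.isIn g k) d.keys).map (fun k => d.getD k []) = M
  cases M with
  | nil => rfl
  | cons h t => rfl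

-- ===== VERDICT (by name: the statement is the Claim_ definition above) =====
theorem common_list_generator_py_spec : Claim_equal_common_list_generator_py := by
  intro init_dict _ _
  unfold Spec_common_list_generator_py common_list_generator_py common_list_generator_py_alt
  dsimp only
  have hkeys : (pvDecode init_dict).keys = PySem.Set.ofList (init_dict.map (·.1)) := by
    unfold pvDecode
    rw [PySem.Dict.keys_foldl_insert_key init_dict (fun p => p.1) (fun _ p => p.2) PySem.Dict.empty]
    rw [show (PySem.Dict.empty : PySem.Dict String (List Int)).keys = [] from rfl,
        PySem.Set.update_nil_left]
  have hndk : (pvDecode init_dict).keys.Nodup := by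
    rw [hkeys]; exact PySem.Set.nodup_ofList _
  have hgroups :
      (pvDecode init_dict).keys.foldl (fun gs k => PySem.Set.add gs (pvKeyGroup k)) PySem.Set.empty
        = PySem.List.dedup ((pvDecode init_dict).keys.map pvKeyGroup) := by
    rw [PySem.List.dedup_eq_ofList, ← PySem.Set.update_nil_left,
        PySem.Set.update_map_eq_foldl_add]
    rfl
  rw [hgroups]
  rw [PySem.List.foldl_append_singleton_eq_map
        (fun g => (g, pvGroupCommon (pvDecode init_dict) (pvDecode init_dict).keys g))
        (PySem.List.dedup ((pvDecode init_dict).keys.map pvKeyGroup)) []]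
  have hGnd : (PySem.List.dedup ((pvDecode init_dict).keys.map pvKeyGroup)).Nodup := by
    rw [PySem.List.dedup_eq_ofList]; exact PySem.Set.nodup_ofList _
  rw [List.nil_append]
  apply List.map_congr_left
  intro g hg
  rw [← pv_group_eq (pvDecode init_dict) hndk _ hGnd g hg]
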